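-- pv_equiv track=rewrite | github.com/bonicim/technical_interviews_exposed | src/algorithms/search_questions/battleship_game.py | fire_missle_naive_solution
-- ===== SOURCE A (Python) =====
-- def fire_missle_naive_solution(battlefield, row, col):
--     ship = battlefield[row][col]
--     battlefield[row][col] = None
--     if ship:
--         for _, row_elem in enumerate(battlefield):
--             for _, col_elem in enumerate(row_elem):
--                 if col_elem == ship:
--                     return "Hit"
--         return "Sink"
--     return "Miss"
-- ===== SOURCE B (Python) =====
-- def fire_missle_naive_solution(battlefield, row, col):
--     freq = {}
--     for r in battlefield:
--         for cell in r:
--             freq[cell] = freq.get(cell, 0) + 1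
--     ship = battlefield[row][col]
--     battlefield[row][col] = None
--     if ship:
--         return "Hit" if freq[ship] > 1 else "Sink"
--     return "Miss"
-- ===== Notes on version B (the rewrite author's own statement) =====
-- stated objective: alternative
-- what changed: Replaces A's early-exit nested membership scan of the mutated grid by a frequency dictionary of all cell values built once up front; the Hit/Sink decision becomes a single dict lookup (freq[ship] > 1), no scan of the grid after firing.
import Mathlib
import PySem

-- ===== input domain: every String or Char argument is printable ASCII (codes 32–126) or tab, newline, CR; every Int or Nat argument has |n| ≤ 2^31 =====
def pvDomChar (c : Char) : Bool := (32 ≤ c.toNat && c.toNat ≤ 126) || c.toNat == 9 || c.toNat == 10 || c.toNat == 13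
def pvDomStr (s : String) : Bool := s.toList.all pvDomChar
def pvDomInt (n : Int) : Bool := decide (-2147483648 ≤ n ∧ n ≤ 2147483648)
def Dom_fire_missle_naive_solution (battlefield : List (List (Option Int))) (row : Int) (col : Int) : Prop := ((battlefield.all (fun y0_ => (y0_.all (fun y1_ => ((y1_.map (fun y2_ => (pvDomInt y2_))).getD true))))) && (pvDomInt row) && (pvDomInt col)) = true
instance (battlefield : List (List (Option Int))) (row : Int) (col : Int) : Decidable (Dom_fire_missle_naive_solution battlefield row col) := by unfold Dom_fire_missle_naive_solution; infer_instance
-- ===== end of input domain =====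

-- B replaces A's early-exit nested membership scan of the mutated grid by a frequency
-- dictionary of all cell values built once up front; the decision is then a single
-- dict lookup (freq[ship] > 1). Equivalence is about the RETURN value (both Pythons
-- perform the identical in-place mutation battlefield[row][col] = None).

-- ===== PORT A =====
-- Python truthiness of a cell: None and 0 are falsy.
def pvTruthy (o : Option Int) : Bool :=
  match o with
  | none => false
  | some v => v != 0

-- inner 'for col_elem in row_elem: if col_elem == ship: return "Hit"'
def pvScanRowA (ship : Option Int) : List (Option Int) → Bool
  | [] => false
  | c :: cs => if c == ship then true else pvScanRowA ship cs

-- outer 'for row_elem in battlefield: …'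
def pvScanA (ship : Option Int) : List (List (Option Int)) → Bool
  | [] => false
  | r :: rs => if pvScanRowA ship r then true else pvScanA ship rs

def fire_missle_naive_solution (battlefield : List (List (Option Int))) (row : Int) (col : Int) : String :=
  match PySem.List.pyGet? battlefield row with
  | none => ""   -- IndexError, excluded by Pre_
  | some r =>
    match PySem.List.pyGet? r col with
    | none => ""   -- IndexError, excluded by Pre_
    | some ship =>
      let battlefield' := PySem.List.pySetD battlefield row (PySem.List.pySetD r col none)
      if pvTruthy ship then
        if pvScanA ship battlefield' then "Hit" else "Sink"
      else "Miss"

-- ===== PORT B =====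
-- 'freq = {}; for r in battlefield: for cell in r: freq[cell] = freq.get(cell, 0) + 1'
def fire_missle_naive_solution_alt (battlefield : List (List (Option Int))) (row : Int) (col : Int) : String :=
  let freq : PySem.Dict (Option Int) Int :=
    battlefield.foldl
      (fun d r => r.foldl (fun d c => d.insert c (d.getD c 0 + 1)) d)
      PySem.Dict.empty
  match PySem.List.pyGet? battlefield row with
  | none => ""   -- IndexError, excluded by Pre_
  | some r =>
    match PySem.List.pyGet? r col with
    | none => ""   -- IndexError, excluded by Pre_
    | some ship =>
      if pvTruthy ship then
        if freq.getD ship 0 > 1 then "Hit" else "Sink"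
      else "Miss"

-- ===== PRECONDITION & SPEC =====
-- Pre_: exactly the inputs where Python A returns (both index accesses in range); outside, A raises IndexError.
def Pre_fire_missle_naive_solution (battlefield : List (List (Option Int))) (row : Int) (col : Int) : Prop :=
  PySem.Raise.InRange battlefield.length row ∧
  PySem.Raise.InRange ((PySem.List.pyGet? battlefield row).getD []).length col

instance (battlefield : List (List (Option Int))) (row : Int) (col : Int) : Decidable (Pre_fire_missle_naive_solution battlefield row col) := by
  unfold Pre_fire_missle_naive_solution; infer_instance

def pvWitness_fire_missle_naive_solution : List (List (Option Int)) × Int × Int :=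
  ([[some 1, none], [some 1, some 2]], 0, 0)

def Spec_fire_missle_naive_solution (battlefield : List (List (Option Int))) (row : Int) (col : Int) (out : String) : Prop := out = fire_missle_naive_solution_alt battlefield row col
instance (battlefield : List (List (Option Int))) (row : Int) (col : Int) (out : String) : Decidable (Spec_fire_missle_naive_solution battlefield row col out) := by unfold Spec_fire_missle_naive_solution; infer_instance

-- ===== CLAIM (what is proved, stated in full; the proofs are below) =====
def Claim_equal_fire_missle_naive_solution : Prop := ∀ (battlefield : List (List (Option Int))) (row : Int) (col : Int), Dom_fire_missle_naive_solution battlefield row col → Pre_fire_missle_naive_solution battlefield row col → Spec_fire_missle_naive_solution battlefield row col (fire_missle_naive_solution battlefield row col)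

-- ===== LEMMAS AND PROOFS =====

-- A's inner row scan succeeds iff the row contains ship.
theorem pvScanRowA_eq_count (ship : Option Int) (r : List (Option Int)) :
    pvScanRowA ship r = (r.count ship != 0) := by
  induction r with
  | nil => simp [pvScanRowA]
  | cons c cs ih =>
    by_cases h : c == ship
    · simp [pvScanRowA, h, List.count_cons]
    · simp only [pvScanRowA, h, Bool.false_eq_true, ih]
      simp only [beq_iff_eq] at h
      simp [h]

-- A's grid scan succeeds iff the total count over the grid is nonzero.
theorem pvScanA_eq_sum (ship : Option Int) (g : List (List (Option Int))) :
    pvScanA ship g = ((g.map (fun rr => rr.count ship)).sum != 0) := by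
  induction g with
  | nil => simp [pvScanA]
  | cons r rs ih =>
    simp only [pvScanA, pvScanRowA_eq_count, List.map_cons, List.sum_cons, ih]
    by_cases h : r.count ship = 0 <;> simp [h]

-- casting a sum of Nat counts into Int, elementwise
theorem cast_sum_natCast (g : List (List (Option Int))) (ship : Option Int) :
    ((g.map (List.count ship)).sum : Int)
      = (g.map (fun rr => ((List.count ship rr : Nat) : Int))).sum := by
  induction g with
  | nil => simp
  | cons a as ih => simp only [List.map_cons, List.sum_cons, ← ih]; push_cast; ring

-- B's nested dict-building loop is the counter of the flattened grid; its lookup is the total count.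
theorem pvFreq_getD (g : List (List (Option Int))) (ship : Option Int) :
    (g.foldl (fun d r => r.foldl (fun d c => d.insert c (d.getD c 0 + 1)) d)
        PySem.Dict.empty).getD ship 0
      = ((g.map (fun rr => rr.count ship)).sum : Int) := by
  rw [← List.foldl_flatten, PySem.Dict.foldl_insert_getD_add_one_eq_counter,
    PySem.Dict.getD_counter]
  rw [List.count_flatten]
  exact cast_sum_natCast g ship

-- under InRange, pyGet? and pySetD agree with a single normalized nat index
theorem pyIdx_spec {α : Type} (xs : List α) (i : Int) (h : PySem.Raise.InRange xs.length i) :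
    ∃ k : Nat, k < xs.length ∧ PySem.List.pyIdx? xs.length i = some k := by
  obtain ⟨h1, h2⟩ := h
  unfold PySem.List.pyIdx?
  by_cases h0 : 0 ≤ i
  · exact ⟨i.toNat, by omega, by simp [h0]; omega⟩
  · refine ⟨xs.length - (-i).toNat, by omega, ?_⟩
    simp [h0, h1]

-- counting after set: count drops by one at an occurrence replaced by a non-occurrence
theorem count_set_none (r : List (Option Int)) (j : Nat) (hj : j < r.length)
    (v : Int) (hr : r[j] = some v) :
    (r.set j none).count (some v) + 1 = r.count (some v) ∧ 0 < r.count (some v) := by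
  have hpos : 0 < r.count (some v) := List.count_pos_iff.mpr (hr ▸ List.getElem_mem hj)
  have := List.count_set (a := (none : Option Int)) (b := some v) (l := r) (i := j) hj
  simp [hr] at this
  omega

-- summing a per-row function after replacing one row
theorem sum_map_set (g : List (List (Option Int))) (f : List (Option Int) → Nat)
    (i : Nat) (hi : i < g.length) (r' : List (Option Int)) :
    ((g.set i r').map f).sum + f g[i] = (g.map f).sum + f r' := by
  induction g generalizing i with
  | nil => simp at hi
  | cons a as ih =>
    cases i with
    | zero => simp [List.set_cons_zero]; omega
    | succ n =>
      simp only [List.set_cons_succ, List.map_cons, List.sum_cons, List.getElem_cons_succ]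
      have := ih n (by simpa using hi)
      omega

-- pySetD under a known pyIdx?
theorem pySetD_of_idx {α : Type} (xs : List α) (i : Int) (k : Nat) (v : α)
    (h : PySem.List.pyIdx? xs.length i = some k) :
    PySem.List.pySetD xs i v = xs.set k v := by
  simp [PySem.List.pySetD, PySem.List.pySet?, h]

theorem cast_sum_counts (bf : List (List (Option Int))) (v : Int) :
    (bf.map (fun rr => (List.count (some v) rr : Int))).sum
      = ((bf.map (fun rr => List.count (some v) rr)).sum : Int) := by
  induction bf with
  | nil => simp
  | cons a as ih => simp only [List.map_cons, List.sum_cons, ih]; push_cast; ring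

theorem pyGet?_of_idx {α : Type} (xs : List α) (i : Int) (k : Nat) (hk : k < xs.length)
    (h : PySem.List.pyIdx? xs.length i = some k) :
    PySem.List.pyGet? xs i = some xs[k] := by
  simp [PySem.List.pyGet?, h, List.getElem?_eq_getElem hk]

-- ===== VERDICT (by name: the statement is the Claim_ definition above) =====
theorem fire_missle_naive_solution_spec : Claim_equal_fire_missle_naive_solution := by
  intro bf row col _ hpre
  obtain ⟨h1, h2⟩ := hpre
  obtain ⟨k, hk, hkeq⟩ := pyIdx_spec bf row h1
  have hget : PySem.List.pyGet? bf row = some bf[k] := pyGet?_of_idx bf row k hk hkeq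
  rw [hget] at h2
  simp only [Option.getD_some] at h2
  obtain ⟨m, hm, hmeq⟩ := pyIdx_spec bf[k] col h2
  have hget2 : PySem.List.pyGet? bf[k] col = some bf[k][m] := pyGet?_of_idx bf[k] col m hm hmeq
  unfold Spec_fire_missle_naive_solution fire_missle_naive_solution fire_missle_naive_solution_alt
  simp only [hget, hget2, pvFreq_getD]
  simp only [pySetD_of_idx bf[k] col m none hmeq, pySetD_of_idx bf row k _ hkeq]
  match hship : bf[k][m] with
  | none => simp [pvTruthy]
  | some v =>
    by_cases hv : v = 0
    · simp [pvTruthy, hv]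
    · simp only [pvTruthy, bne_iff_ne, ne_eq, hv, not_false_eq_true, if_true]
      have hcnt := count_set_none bf[k] m hm v hship
      have hsum := sum_map_set bf (fun rr => rr.count (some v)) k hk (bf[k].set m none)
      simp only [pvScanA_eq_sum, List.map_set]
      have key : ((bf.map (fun rr => List.count (some v) rr)).set k
            (List.count (some v) (bf[k].set m none))).sum + 1
          = (bf.map (fun rr => List.count (some v) rr)).sum := by
        rw [← List.map_set]; omega
      by_cases hbig : 1 < (bf.map (fun rr => List.count (some v) rr)).sum
      · have hne : ((bf.map (fun rr => List.count (some v) rr)).set k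
            (List.count (some v) (bf[k].set m none))).sum ≠ 0 := by omega
        simp [hne]
        rw [cast_sum_counts]
        omega
      · have heq : ((bf.map (fun rr => List.count (some v) rr)).set k
            (List.count (some v) (bf[k].set m none))).sum = 0 := by omega
        simp [heq]
        rw [cast_sum_counts]
        omega
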